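-- pv_equiv track=rewrite | github.com/Discovery-IDRs/predIDR | src/models/features.py | get_pair_repeat_count
-- ===== SOURCE A (Python) =====
-- def get_pair_repeat_count(seq, XY):
--     """Return count of pair symbols contained in XY in seq which appear two or more times in a row.
--
--     Parameters
--     ----------
--         seq : string
--             Protein sequence as string.
--         XY : string or list
--             Pair of symbols to count for repeats.
--             Must contain at least two symbols.
--
--     Returns
--     -------
--         pair_repeat_count : int
--             Count of repeat pair symbols in seq.
--     """
--     if len(XY) < 2:
--         raise ValueError('Requires at least two symbols.')
--     if len(seq) <= 1:
--         return 0
--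
--     # Count terminal symbols
--     pair_repeat_count = 0
--     if seq[0] in XY and seq[1] in XY:
--         pair_repeat_count += 1
--     if seq[len(seq) - 1] in XY and seq[len(seq) - 2] in XY:
--         pair_repeat_count += 1
--
--     # Count interior symbols
--     if len(seq) > 2:
--         for i in range(1, len(seq) - 1):
--             if seq[i] in XY:
--                 if seq[i-1] in XY:
--                     pair_repeat_count += 1
--                 elif seq[i+1] in XY:
--                     pair_repeat_count += 1
--
--     return pair_repeat_count
-- ===== SOURCE B (Python) =====
-- def get_pair_repeat_count(seq, XY):
--     """Run-length reformulation: sum the lengths of maximal runs of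
--     XY-symbols of length >= 2 (a position counts iff it sits in such a run)."""
--     if len(XY) < 2:
--         raise ValueError('Requires at least two symbols.')
--     total = 0
--     run = 0
--     for c in seq:
--         if c in XY:
--             run += 1
--         else:
--             if run >= 2:
--                 total += run
--             run = 0
--     if run >= 2:
--         total += run
--     return total
-- ===== Notes on version B (the rewrite author's own statement) =====
-- stated objective: simpler
-- what changed: A's two terminal checks plus an index loop over the interior with seq[i-1]/seq[i+1] neighbour lookups are replaced by a single run-length pass that keeps (total, current run of XY-symbols) and adds the length of each maximal run of length >= 2.
-- outside the precondition, e.g. on get_pair_repeat_count('AA', 'A'): A raises ValueError, B raises ValueError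
import Mathlib
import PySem

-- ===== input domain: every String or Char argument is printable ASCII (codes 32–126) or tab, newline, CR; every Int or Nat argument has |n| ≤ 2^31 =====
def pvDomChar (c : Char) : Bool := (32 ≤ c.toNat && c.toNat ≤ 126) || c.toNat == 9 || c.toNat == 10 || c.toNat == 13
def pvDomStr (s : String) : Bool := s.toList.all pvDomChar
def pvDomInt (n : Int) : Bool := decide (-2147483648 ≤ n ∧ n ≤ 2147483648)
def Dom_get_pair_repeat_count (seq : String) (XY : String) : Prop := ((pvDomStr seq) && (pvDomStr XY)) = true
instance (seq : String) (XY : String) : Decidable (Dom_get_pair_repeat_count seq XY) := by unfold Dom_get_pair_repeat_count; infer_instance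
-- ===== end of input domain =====

-- B replaces A's terminal checks + interior index loop with one run-length pass:
-- it sums the lengths of maximal runs of XY-symbols of length ≥ 2 (objective: simpler).

-- ===== PORT A =====
-- literal transliteration of A: two terminal checks, then a fold over range(1, n-1)
def get_pair_repeat_count (seq : String) (XY : String) : Int :=
  let s := seq.toList
  let xy := XY.toList
  if xy.length < 2 then 0   -- Python raises ValueError here; excluded by Pre_
  else if s.length ≤ 1 then 0
  else
    let n := s.length
    let c1 : Int := if xy.contains (s.getD 0 ' ') && xy.contains (s.getD 1 ' ') then 1 else 0
    let c2 : Int := c1 + (if xy.contains (s.getD (n-1) ' ') && xy.contains (s.getD (n-2) ' ') then 1 else 0)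
    if n > 2 then
      (List.range' 1 (n-2)).foldl (fun acc i =>
        if xy.contains (s.getD i ' ') then
          (if xy.contains (s.getD (i-1) ' ') then acc + 1
           else if xy.contains (s.getD (i+1) ' ') then acc + 1 else acc)
        else acc) c2
    else c2

-- ===== PORT B =====
-- literal transliteration of Source B: one fold keeping (total, current run length)
def get_pair_repeat_count_alt (seq : String) (XY : String) : Int :=
  let xy := XY.toList
  if xy.length < 2 then 0   -- Python raises ValueError here; excluded by Pre_
  else
    let q := seq.toList.foldl (fun (p : Int × Int) c =>
      if xy.contains c then (p.1, p.2 + 1)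
      else ((if p.2 ≥ 2 then p.1 + p.2 else p.1), 0)) ((0 : Int), (0 : Int))
    if q.2 ≥ 2 then q.1 + q.2 else q.1

-- ===== PRECONDITION & SPEC =====
-- Pre_ excludes exactly len(XY) < 2, where the Python A (and B) raises ValueError.
def Pre_get_pair_repeat_count (seq : String) (XY : String) : Prop := 2 ≤ XY.toList.length
instance (seq : String) (XY : String) : Decidable (Pre_get_pair_repeat_count seq XY) := by unfold Pre_get_pair_repeat_count; infer_instance
def pvWitness_get_pair_repeat_count : String × String := ("AABXX", "AB")
def Spec_get_pair_repeat_count (seq : String) (XY : String) (out : Int) : Prop := out = get_pair_repeat_count_alt seq XY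
instance (seq : String) (XY : String) (out : Int) : Decidable (Spec_get_pair_repeat_count seq XY out) := by unfold Spec_get_pair_repeat_count; infer_instance

-- ===== CLAIM (what is proved, stated in full; the proofs are below) =====
def Claim_equal_get_pair_repeat_count : Prop := ∀ (seq : String) (XY : String), Dom_get_pair_repeat_count seq XY → Pre_get_pair_repeat_count seq XY → Spec_get_pair_repeat_count seq XY (get_pair_repeat_count seq XY)

-- ===== LEMMAS AND PROOFS =====

-- pvV m i: 1 iff position i (in the boolean mask m) is an XY-symbol with an XY neighbour
def pvV (m : List Bool) (i : Nat) : Int :=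
  if (m.getD i false && ((decide (1 ≤ i) && m.getD (i-1) false) || m.getD (i+1) false)) then 1 else 0

-- structural (prev-flag) count of such positions
def pvC : Bool → List Bool → Int
  | _, [] => 0
  | p, a :: m => (if a && (p || m.getD 0 false) then 1 else 0) + pvC a m

-- B's run accumulator, state = current run length
def pvG : Nat → List Bool → Int
  | k, [] => if 2 ≤ k then (k : Int) else 0
  | k, b :: m => if b then pvG (k+1) m else (if 2 ≤ k then (k : Int) else 0) + pvG 0 m

-- contribution of a pending run of length k followed by m
def pvRbc (k : Nat) (m : List Bool) : Int :=
  if 2 ≤ k then (k : Int) else if k = 1 && m.getD 0 false then 1 else 0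

theorem pvG_eq (m : List Bool) : ∀ k, pvG k m = pvRbc k m + pvC (decide (1 ≤ k)) m := by
  induction m with
  | nil =>
    intro k
    simp only [pvG, pvRbc, pvC, List.getD_nil]
    split_ifs <;> simp_all
  | cons a m ih =>
    intro k
    cases a with
    | true =>
      have h1 : pvG k (true :: m) = pvG (k+1) m := by simp [pvG]
      rw [h1, ih (k+1)]
      simp only [pvC, Bool.true_and]
      have hk : pvRbc (k+1) m = pvRbc k (true :: m)
          + (if (decide (1 ≤ k) || m.getD 0 false) then (1 : Int) else 0) := by
        rcases k with _ | _ | k <;> cases h : m[0]?.getD false <;>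
          simp [pvRbc, List.getD_eq_getElem?_getD, h]
      have hd : decide (1 ≤ k + 1) = true := by simp
      rw [hd, hk]; ring
    | false =>
      have h1 : pvG k (false :: m) = (if 2 ≤ k then (k : Int) else 0) + pvG 0 m := by
        simp [pvG]
      rw [h1, ih 0]
      simp only [pvC, pvRbc, Bool.false_and]
      split_ifs <;> simp_all

-- B's fold computes pvG
theorem pvBfold (m : List Bool) : ∀ (t : Int) (k : Nat),
    (let q := m.foldl (fun (p : Int × Int) b =>
        if b then (p.1, p.2 + 1)
        else ((if p.2 ≥ 2 then p.1 + p.2 else p.1), 0)) (t, (k : Int));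
      if q.2 ≥ 2 then q.1 + q.2 else q.1) = t + pvG k m := by
  induction m with
  | nil =>
    intro t k
    simp only [List.foldl_nil, pvG]
    by_cases h : 2 ≤ k
    · have h' : ((k : Int) ≥ 2) := by exact_mod_cast h
      rw [if_pos h', if_pos h]
    · have h' : ¬ ((k : Int) ≥ 2) := by omega
      rw [if_neg h', if_neg h]
      exact (add_zero t).symm
  | cons b m ih =>
    intro t k
    cases b with
    | true =>
      have hc : ((k : Int) + 1) = ((k + 1 : Nat) : Int) := by push_cast; ring
      simp only [List.foldl_cons, pvG]
      simp only [hc]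
      exact ih t (k+1)
    | false =>
      simp only [List.foldl_cons, pvG]
      by_cases h : 2 ≤ k
      · have h' : ((k : Int) ≥ 2) := by exact_mod_cast h
        simp only [Bool.false_eq_true, if_false, if_pos h', if_pos h]
        have := ih (t + (k : Int)) 0
        simpa [add_assoc] using this
      · have h' : ¬ ((k : Int) ≥ 2) := by omega
        simp only [Bool.false_eq_true, if_false, if_neg h', if_neg h]
        simpa using ih t 0

-- pvC as a sum over indices
theorem pvC_sum (m : List Bool) : ∀ (p : Bool),
    pvC p m = ((List.range m.length).map (fun i =>
      if (m.getD i false && ((if i = 0 then p else m.getD (i-1) false) || m.getD (i+1) false))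
      then (1 : Int) else 0)).sum := by
  induction m with
  | nil => intro p; simp [pvC]
  | cons a m ih =>
    intro p
    rw [List.length_cons, List.range_succ_eq_map, List.map_cons, List.sum_cons, List.map_map]
    have hf : ((fun i =>
        if ((a :: m).getD i false && ((if i = 0 then p else (a :: m).getD (i-1) false)
            || (a :: m).getD (i+1) false)) then (1 : Int) else 0) ∘ (fun i => i + 1))
        = (fun i => if (m.getD i false && ((if i = 0 then a else m.getD (i-1) false)
            || m.getD (i+1) false)) then (1 : Int) else 0) := by
      funext i
      rcases i with _ | i <;> simp
    rw [hf, ← ih a]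
    simp [pvC]

theorem pvV_eq_term (m : List Bool) (i : Nat) :
    (if (m.getD i false && ((if i = 0 then false else m.getD (i-1) false) || m.getD (i+1) false))
      then (1 : Int) else 0) = pvV m i := by
  rcases i with _ | i <;> simp [pvV]

theorem pvC_false_sum (m : List Bool) :
    pvC false m = ((List.range m.length).map (pvV m)).sum := by
  rw [pvC_sum m false]
  congr 1
  exact List.map_congr_left (fun i _ => pvV_eq_term m i)

-- short mask is all-isolated
theorem pvC_short (m : List Bool) (h : m.length ≤ 1) : pvC false m = 0 := by
  rcases m with _ | ⟨a, _ | ⟨b, m⟩⟩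
  · simp [pvC]
  · simp [pvC]
  · simp at h

-- mask lookup vs char lookup
theorem pvMask_getD (xy : List Char) (s : List Char) (i : Nat) (h : i < s.length) :
    (s.map (fun c => xy.contains c)).getD i false = xy.contains (s.getD i ' ') := by
  rw [List.getD_eq_getElem _ _ (by simpa using h), List.getD_eq_getElem _ _ h]
  simp

-- B in closed form
theorem pvAltEq (seq XY : String) (h : ¬ XY.toList.length < 2) :
    get_pair_repeat_count_alt seq XY
      = pvC false (seq.toList.map (fun c => XY.toList.contains c)) := by
  unfold get_pair_repeat_count_alt
  rw [if_neg h]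
  have hmap : seq.toList.foldl (fun (p : Int × Int) c =>
        if XY.toList.contains c then (p.1, p.2 + 1)
        else ((if p.2 ≥ 2 then p.1 + p.2 else p.1), 0)) ((0 : Int), (0 : Int))
      = (seq.toList.map (fun c => XY.toList.contains c)).foldl (fun (p : Int × Int) b =>
        if b then (p.1, p.2 + 1)
        else ((if p.2 ≥ 2 then p.1 + p.2 else p.1), 0)) ((0 : Int), (0 : Int)) := by
    rw [List.foldl_map]
  simp only [hmap]
  have hb := pvBfold (seq.toList.map (fun c => XY.toList.contains c)) 0 0
  simp only [Nat.cast_zero] at hb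
  rw [hb, pvG_eq _ 0]
  simp [pvRbc]

-- splitting range n at both ends, n ≥ 2
theorem pvRange_split (n : Nat) (h : 2 ≤ n) :
    List.range n = 0 :: (List.range' 1 (n-2) ++ [n-1]) := by
  rw [List.range_eq_range', show n = ((n-2)+1)+1 by omega, List.range'_succ,
    List.range'_1_concat]
  have e1 : n-2+1+1-2 = n-2 := by omega
  have e2 : n-2+1+1-1 = n-1 := by omega
  have e3 : 0+1+(n-2) = n-1 := by omega
  simp only [Nat.zero_add, e1, e2, e3]

-- A's middle loop + terminal checks, in list form, equal pvC
theorem pvAEqList (s xy : List Char) (hn2 : 2 ≤ s.length) :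
    (if s.length > 2 then
      (List.range' 1 (s.length-2)).foldl (fun acc i =>
        if xy.contains (s.getD i ' ') then
          (if xy.contains (s.getD (i-1) ' ') then acc + 1
           else if xy.contains (s.getD (i+1) ' ') then acc + 1 else acc)
        else acc)
        ((if xy.contains (s.getD 0 ' ') && xy.contains (s.getD 1 ' ') then (1:Int) else 0)
          + (if xy.contains (s.getD (s.length-1) ' ') && xy.contains (s.getD (s.length-2) ' ')
             then (1:Int) else 0))
     else
      ((if xy.contains (s.getD 0 ' ') && xy.contains (s.getD 1 ' ') then (1:Int) else 0)
        + (if xy.contains (s.getD (s.length-1) ' ') && xy.contains (s.getD (s.length-2) ' ')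
           then (1:Int) else 0)))
    = pvC false (s.map (fun c => xy.contains c)) := by
  set m := s.map (fun c => xy.contains c) with hm
  have hmlen : m.length = s.length := by simp [hm]
  have ht0 : (if xy.contains (s.getD 0 ' ') && xy.contains (s.getD 1 ' ') then (1:Int) else 0)
      = pvV m 0 := by
    have g0 : m.getD 0 false = xy.contains (s.getD 0 ' ') := pvMask_getD xy s 0 (by omega)
    have g1 : m.getD 1 false = xy.contains (s.getD 1 ' ') := pvMask_getD xy s 1 (by omega)
    have hv : pvV m 0 = (if (m.getD 0 false && m.getD 1 false) then (1:Int) else 0) := by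
      simp [pvV]
    rw [hv, g0, g1]
  have htl : (if xy.contains (s.getD (s.length-1) ' ') && xy.contains (s.getD (s.length-2) ' ')
        then (1:Int) else 0) = pvV m (s.length-1) := by
    have g0 : m.getD (s.length-1) false = xy.contains (s.getD (s.length-1) ' ') :=
      pvMask_getD xy s (s.length-1) (by omega)
    have g1 : m.getD (s.length-2) false = xy.contains (s.getD (s.length-2) ' ') :=
      pvMask_getD xy s (s.length-2) (by omega)
    have hd : decide (1 ≤ s.length - 1) = true := by simp; omega
    have hout : m.getD (s.length-1+1) false = false := by
      apply List.getD_eq_default; omega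
    have hidx : s.length - 1 - 1 = s.length - 2 := by omega
    have hv : pvV m (s.length-1)
        = (if (m.getD (s.length-1) false && m.getD (s.length-2) false) then (1:Int) else 0) := by
      simp only [pvV, hidx, hout, Bool.or_false, hd, Bool.true_and]
    rw [hv, g0, g1]
  have hsum : pvC false m = pvV m 0 + (((List.range' 1 (s.length-2)).map (pvV m)).sum
      + pvV m (s.length-1)) := by
    rw [pvC_false_sum, hmlen, pvRange_split s.length hn2]
    simp [List.sum_append]
  by_cases hbig : s.length > 2
  · rw [if_pos hbig]
    have hbody : (List.range' 1 (s.length - 2)).foldl (fun acc i =>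
        if xy.contains (s.getD i ' ') then
          (if xy.contains (s.getD (i-1) ' ') then acc + 1
           else if xy.contains (s.getD (i+1) ' ') then acc + 1 else acc)
        else acc) (pvV m 0 + pvV m (s.length-1)) =
        (List.range' 1 (s.length - 2)).foldl (fun acc i => acc + pvV m i)
          (pvV m 0 + pvV m (s.length-1)) := by
      apply PySem.List.foldl_congr_mem
      intro acc i hi
      have hi' : 1 ≤ i ∧ i < s.length - 1 := by
        have := List.mem_range'.mp hi
        omega
      have g0 : m.getD i false = xy.contains (s.getD i ' ') := pvMask_getD xy s i (by omega)
      have g1 : m.getD (i-1) false = xy.contains (s.getD (i-1) ' ') :=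
        pvMask_getD xy s (i-1) (by omega)
      have g2 : m.getD (i+1) false = xy.contains (s.getD (i+1) ' ') :=
        pvMask_getD xy s (i+1) (by omega)
      have hd : decide (1 ≤ i) = true := by simp; omega
      simp only [pvV, g0, g1, g2, hd, Bool.true_and]
      cases h0 : xy.contains (s.getD i ' ') <;>
        cases h1 : xy.contains (s.getD (i-1) ' ') <;>
          cases h2 : xy.contains (s.getD (i+1) ' ') <;> simp
    rw [ht0, htl, hbody,
      PySem.List.foldl_add (l := List.range' 1 (s.length - 2)) (g := pvV m), hsum]
    ring
  · rw [if_neg hbig]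
    have h0 : s.length - 2 = 0 := by omega
    rw [ht0, htl, hsum, h0]
    simp only [List.range'_zero, List.map_nil, List.sum_nil, zero_add]

-- ===== VERDICT (by name: the statement is the Claim_ definition above) =====
theorem get_pair_repeat_count_spec : Claim_equal_get_pair_repeat_count := by
  intro seq XY _ hpre
  unfold Spec_get_pair_repeat_count
  have hxy : ¬ XY.toList.length < 2 := by
    unfold Pre_get_pair_repeat_count at hpre; omega
  rw [pvAltEq seq XY hxy]
  unfold get_pair_repeat_count
  rw [if_neg hxy]
  by_cases hshort : seq.toList.length ≤ 1
  · rw [if_pos hshort]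
    exact (pvC_short _ (by simpa using hshort)).symm
  · rw [if_neg hshort]
    exact pvAEqList seq.toList XY.toList (by omega)
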